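-- pv_equiv track=rewrite | github.com/zioni715/Data-Collection-Projection | scripts/report_patterns.py | _build_time_buckets
-- ===== SOURCE A (Python) =====
-- from collections import Counter, defaultdict
--
-- def _build_time_buckets(hourly: dict[int, Counter]) -> dict[str, list[tuple[str, int]]]:
--     buckets = {
--         "night(00-05)": range(0, 6),
--         "morning(06-11)": range(6, 12),
--         "afternoon(12-17)": range(12, 18),
--         "evening(18-23)": range(18, 24),
--     }
--     output: dict[str, Counter] = {name: Counter() for name in buckets}
--     for bucket_name, hours in buckets.items():
--         for hour in hours:
--             if hour not in hourly:
--                 continue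
--             for app, sec in hourly[hour].items():
--                 output[bucket_name][app] += sec
--     return {name: counter.most_common(3) for name, counter in output.items()}
-- ===== SOURCE B (Python) =====
-- def _build_time_buckets(hourly):
--     names = ["night(00-05)", "morning(06-11)", "afternoon(12-17)", "evening(18-23)"]
--     # one flat dict keyed by (bucket index, app), filled in ascending-hour order
--     totals = {}
--     for hour in sorted(hourly):
--         if 0 <= hour < 24:
--             for app, sec in hourly[hour].items():
--                 key = (hour // 6, app)
--                 totals[key] = totals.get(key, 0) + sec
--     # streaming bounded-insertion top-3 per bucket (no sort, no Counter)
--     tops = [[], [], [], []]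
--     for (b, app), sec in totals.items():
--         top = tops[b]
--         i = 0
--         while i < len(top) and top[i][1] >= sec:
--             i += 1
--         top.insert(i, (app, sec))
--         del top[3:]
--     return dict(zip(names, tops))
-- ===== Notes on version B (the rewrite author's own statement) =====
-- stated objective: alternative
-- what changed: B replaces A's four per-bucket Counters fed through a bucket->range table and sorted via most_common by one flat dict keyed by (bucket,app) pairs filled in a single ascending pass over the actual hour keys, followed by a streaming bounded-insertion top-3 selection (a <=3-element insertion list per bucket) instead of sorting each counter.
import Mathlib
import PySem

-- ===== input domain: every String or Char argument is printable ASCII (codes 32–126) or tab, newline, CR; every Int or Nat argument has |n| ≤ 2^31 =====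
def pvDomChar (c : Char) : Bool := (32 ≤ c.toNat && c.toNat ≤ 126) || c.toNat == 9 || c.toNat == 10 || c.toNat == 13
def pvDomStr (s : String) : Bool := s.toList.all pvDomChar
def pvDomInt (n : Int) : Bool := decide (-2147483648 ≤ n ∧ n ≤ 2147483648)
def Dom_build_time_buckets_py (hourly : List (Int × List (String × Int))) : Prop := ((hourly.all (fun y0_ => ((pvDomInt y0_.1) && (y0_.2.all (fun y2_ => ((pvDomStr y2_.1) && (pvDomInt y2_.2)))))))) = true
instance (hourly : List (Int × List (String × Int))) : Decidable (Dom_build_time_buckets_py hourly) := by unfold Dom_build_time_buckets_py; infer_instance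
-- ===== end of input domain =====

-- B drops A's four per-bucket Counters and the bucket->range probe table: it fills ONE flat
-- dict keyed by (bucket, app) in a single ascending pass over the actual hour keys, then
-- selects each bucket's top 3 by streaming bounded insertion instead of sorting a counter.

-- ===== PORT A =====
-- counter.most_common(3): stable sort by count descending, first three
def pvMostCommon3 (c : List (String × Int)) : List (String × Int) :=
  (PySem.List.sorted c (fun p => p.2) true).take 3

-- the body of A's outer loop: one bucket's pass over its hour range
def pvBucketFold (hd : PySem.Dict Int (List (String × Int))) (name : String)
    (hs : List Int) (o : PySem.Dict String (PySem.Dict String Int)) :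
    PySem.Dict String (PySem.Dict String Int) :=
  hs.foldl (fun o h =>
    match hd.get? h with
    | none => o
    | some ctr =>
        ctr.foldl (fun o ap =>
          o.modify name PySem.Dict.empty (fun c => c.insert ap.1 (c.getD ap.1 0 + ap.2))) o) o

def build_time_buckets_py (hourly : List (Int × List (String × Int))) :
    List (String × List (String × Int)) :=
  let hd : PySem.Dict Int (List (String × Int)) := PySem.Dict.mk hourly
  let buckets : List (String × List Int) :=
    [("night(00-05)", PySem.List.pyRange 0 6 1),
     ("morning(06-11)", PySem.List.pyRange 6 12 1),
     ("afternoon(12-17)", PySem.List.pyRange 12 18 1),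
     ("evening(18-23)", PySem.List.pyRange 18 24 1)]
  let output : PySem.Dict String (PySem.Dict String Int) :=
    buckets.foldl (fun o p => o.insert p.1 PySem.Dict.empty) PySem.Dict.empty
  let output := buckets.foldl (fun o p => pvBucketFold hd p.1 p.2 o) output
  output.items.map (fun p => (p.1, pvMostCommon3 p.2.items))

-- ===== PORT B =====
-- the while/insert/del of Source B: put x after every entry whose count is >= x's count
def pvIns (x : String × Int) : List (String × Int) → List (String × Int)
  | [] => [x]
  | y :: t => if x.2 ≤ y.2 then y :: pvIns x t else x :: y :: t

-- first loop of Source B: fold one hour's apps into the flat (bucket, app)-keyed dict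
def pvCollect (hd : PySem.Dict Int (List (String × Int)))
    (F : PySem.Dict (Int × String) Int) (hour : Int) : PySem.Dict (Int × String) Int :=
  if 0 ≤ hour ∧ hour < 24 then
    match hd.get? hour with
    | none => F   -- unreachable: hour is one of hd's keys (totality guard only)
    | some items =>
        items.foldl (fun F ap =>
          F.insert (PySem.Int.floordiv hour 6, ap.1)
            (F.getD (PySem.Int.floordiv hour 6, ap.1) 0 + ap.2)) F
  else F

-- second loop of Source B: route one flat-dict item to its bucket's <=3-element top list
def pvDispatch (tops : List (List (String × Int))) (p : (Int × String) × Int) :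
    List (List (String × Int)) :=
  match PySem.List.pyGet? tops p.1.1 with
  | none => tops   -- unreachable: the bucket index is always 0..3 (totality guard only)
  | some top => tops.set p.1.1.natAbs ((pvIns (p.1.2, p.2) top).take 3)

def build_time_buckets_py_alt (hourly : List (Int × List (String × Int))) :
    List (String × List (String × Int)) :=
  let hd : PySem.Dict Int (List (String × Int)) := PySem.Dict.mk hourly
  let names : List String :=
    ["night(00-05)", "morning(06-11)", "afternoon(12-17)", "evening(18-23)"]
  let totals : PySem.Dict (Int × String) Int :=
    (PySem.List.sorted (PySem.Set.ofList (hourly.map (fun p => p.1))) (fun h => h)).foldl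
      (pvCollect hd) PySem.Dict.empty
  let tops : List (List (String × Int)) := totals.items.foldl pvDispatch [[], [], [], []]
  names.zip tops

-- ===== PRECONDITION & SPEC =====
def Spec_build_time_buckets_py (hourly : List (Int × List (String × Int))) (out : List (String × List (String × Int))) : Prop := out = build_time_buckets_py_alt hourly
instance (hourly : List (Int × List (String × Int))) (out : List (String × List (String × Int))) : Decidable (Spec_build_time_buckets_py hourly out) := by unfold Spec_build_time_buckets_py; infer_instance

-- ===== CLAIM (what is proved, stated in full; the proofs are below) =====
def Claim_equal_build_time_buckets_py : Prop := ∀ (hourly : List (Int × List (String × Int))), Dom_build_time_buckets_py hourly → Spec_build_time_buckets_py hourly (build_time_buckets_py hourly)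

-- ===== LEMMAS AND PROOFS =====

-- ---- shared vocabulary of the two accumulations ----

-- one 'd[k] = d.get(k, 0) + v' step (the flat dict's step and the Counter '+=' step alike)
def pvGAdd {kk : Type} [BEq kk] (d : PySem.Dict kk Int) (p : kk × Int) : PySem.Dict kk Int :=
  d.insert p.1 (d.getD p.1 0 + p.2)

-- total of the values a pair list carries at one key
def pvKeySum {kk : Type} [BEq kk] (ps : List (kk × Int)) (k : kk) : Int :=
  ((ps.filter (fun p => p.1 == k)).map (fun p => p.2)).sum

theorem pvGsum_getD {kk : Type} [BEq kk] [LawfulBEq kk] [DecidableEq kk] :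
    ∀ (ps : List (kk × Int)) (d : PySem.Dict kk Int) (k : kk),
    (ps.foldl pvGAdd d).getD k 0 = d.getD k 0 + pvKeySum ps k := by
  intro ps
  induction ps with
  | nil => intro d k; simp [pvKeySum]
  | cons p t ih =>
      intro d k
      rw [List.foldl_cons, ih]
      by_cases hk : p.1 = k
      · simp [pvKeySum, hk, pvGAdd]
        ring
      · have hk' : (p.1 == k) = false := by simp [hk]
        have hne : ¬ k = p.1 := fun h => hk h.symm
        simp only [pvGAdd, PySem.Dict.getD_insert, if_neg hne]
        simp [pvKeySum, hk']

-- the accumulated dict, in closed form: first-seen keys, each with its total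
theorem pvGsum_items {kk : Type} [BEq kk] [LawfulBEq kk] [DecidableEq kk] (ps : List (kk × Int)) :
    (ps.foldl pvGAdd PySem.Dict.empty).items
      = (PySem.Set.ofList (ps.map (fun p => p.1))).map (fun k => (k, pvKeySum ps k)) := by
  have hshape : ps.foldl pvGAdd (PySem.Dict.empty : PySem.Dict kk Int)
      = ps.foldl (fun d p => d.insert ((fun p : kk × Int => p.1) p)
          ((fun (d : PySem.Dict kk Int) (p : kk × Int) => d.getD p.1 0 + p.2) d p))
          PySem.Dict.empty := rfl
  have hnd := PySem.Dict.nodup_keys_foldl_insert_key ps (fun p : kk × Int => p.1)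
    (fun (d : PySem.Dict kk Int) (p : kk × Int) => d.getD p.1 0 + p.2) PySem.Dict.empty
    (by rw [PySem.Dict.keys_empty]; exact List.nodup_nil)
  have hkeys := PySem.Dict.keys_foldl_insert_key (ν := Int) ps (fun p : kk × Int => p.1)
    (fun (d : PySem.Dict kk Int) (p : kk × Int) => d.getD p.1 0 + p.2) PySem.Dict.empty
  rw [hshape, PySem.Dict.items_eq_map_keys _ hnd 0, hkeys, PySem.Dict.keys_empty,
    PySem.Set.update_eq_foldl, ← PySem.Set.ofList_eq_foldl]
  apply List.map_congr_left
  intro k _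
  rw [← hshape, pvGsum_getD, PySem.Dict.getD_empty]
  simp

-- first-occurrence dedup commutes with filter
theorem pvOfList_filter {aa : Type} [BEq aa] [LawfulBEq aa] (p : aa → Bool) :
    ∀ l : List aa, PySem.Set.ofList (l.filter p) = (PySem.Set.ofList l).filter p := by
  intro l
  induction l using List.reverseRecOn with
  | nil => rfl
  | append_singleton l x ih =>
      rw [List.filter_append, PySem.Set.ofList_append_singleton]
      by_cases hp : p x = true
      · have hfx : List.filter p [x] = [x] := by simp [hp]
        rw [hfx, PySem.Set.ofList_append_singleton, ih]
        by_cases hm : x ∈ PySem.Set.ofList l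
        · have hmf : x ∈ (PySem.Set.ofList l).filter p := List.mem_filter.mpr ⟨hm, hp⟩
          rw [PySem.Set.add_of_mem hmf, PySem.Set.add_of_mem hm]
        · have hmf : x ∉ (PySem.Set.ofList l).filter p := fun hx => hm (List.mem_filter.mp hx).1
          rw [PySem.Set.add_of_not_mem hmf, PySem.Set.add_of_not_mem hm, List.filter_append]
          simp [hp]
      · have hfx : List.filter p [x] = [] := by simp [hp]
        rw [hfx, List.append_nil, ih]
        by_cases hm : x ∈ PySem.Set.ofList l
        · rw [PySem.Set.add_of_mem hm]
        · rw [PySem.Set.add_of_not_mem hm, List.filter_append]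
          simp [hp]

-- first-occurrence dedup commutes with an injective relabelling
theorem pvOfList_map_inj {aa bb : Type} [BEq aa] [LawfulBEq aa] [BEq bb] [LawfulBEq bb]
    (f : aa → bb) (hf : ∀ a b, f a = f b → a = b) :
    ∀ l : List aa, PySem.Set.ofList (l.map f) = (PySem.Set.ofList l).map f := by
  intro l
  induction l using List.reverseRecOn with
  | nil => rfl
  | append_singleton l x ih =>
      rw [List.map_append, List.map_singleton, PySem.Set.ofList_append_singleton,
        PySem.Set.ofList_append_singleton, ih]
      by_cases hm : x ∈ PySem.Set.ofList l
      · rw [PySem.Set.add_of_mem hm, PySem.Set.add_of_mem (List.mem_map_of_mem hm)]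
      · have hmf : f x ∉ (PySem.Set.ofList l).map f := by
          intro hx
          obtain ⟨a, ha, hfa⟩ := List.mem_map.mp hx
          exact hm (hf a x hfa ▸ ha)
        rw [PySem.Set.add_of_not_mem hm, PySem.Set.add_of_not_mem hmf, List.map_append,
          List.map_singleton]

-- ---- the A side, characterised bucket by bucket (as in the table-driven port) ----

-- the common accumulation: process one hour (skip if absent, else add its counter)
def pvStep (hd : PySem.Dict Int (List (String × Int)))
    (c : PySem.Dict String Int) (h : Int) : PySem.Dict String Int :=
  match hd.get? h with
  | none => c
  | some items => items.foldl pvGAdd c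

def pvAccum (hd : PySem.Dict Int (List (String × Int))) (hs : List Int)
    (c : PySem.Dict String Int) : PySem.Dict String Int :=
  hs.foldl (pvStep hd) c

theorem pvAccum_nil (hd : PySem.Dict Int (List (String × Int))) (c : PySem.Dict String Int) :
    pvAccum hd [] c = c := rfl

theorem pvAccum_cons (hd : PySem.Dict Int (List (String × Int))) (h : Int) (t : List Int)
    (c : PySem.Dict String Int) : pvAccum hd (h :: t) c = pvAccum hd t (pvStep hd c h) := rfl

-- inserting back the value already present (under unique keys) is the identity
theorem pvInsert_self {kk vv : Type} [BEq kk] [LawfulBEq kk] (d : PySem.Dict kk vv) (k : kk) (v : vv)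
    (hnd : d.keys.Nodup) (h : d.get? k = some v) : d.insert k v = d := by
  apply PySem.Dict.ext
  have hc : d.contains k = true := by
    rw [PySem.Dict.contains_eq_isSome_get?, h]; rfl
  rw [PySem.Dict.items_insert_of_contains _ _ hc]
  conv_rhs => rw [← List.map_id d.items]
  apply List.map_congr_left
  intro p hp
  by_cases hk : p.1 = k
  · have hv : d.get? p.1 = some p.2 := PySem.Dict.get?_of_mem_items d (by simpa using hp) hnd
    have hpv : p.2 = v := by
      rw [hk, h] at hv
      exact (Option.some_inj.mp hv).symm
    have hbeq : (p.1 == k) = true := by simp [hk]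
    rw [if_pos hbeq]
    apply Prod.ext <;> simp [hk, hpv]
  · simp [hk]

-- A's inner per-app loop = the pvGAdd fold at the bucket's key
theorem pvInnerA (name : String) :
    ∀ (ctr : List (String × Int)) (o : PySem.Dict String (PySem.Dict String Int))
      (c : PySem.Dict String Int), o.keys.Nodup → o.get? name = some c →
    ctr.foldl (fun o ap =>
        o.modify name PySem.Dict.empty (fun c => c.insert ap.1 (c.getD ap.1 0 + ap.2))) o
      = o.insert name (ctr.foldl pvGAdd c) := by
  intro ctr
  induction ctr with
  | nil =>
      intro o c hnd hget
      simpa using (pvInsert_self o name c hnd hget).symm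
  | cons ap t ih =>
      intro o c hnd hget
      have hgetD : o.getD name PySem.Dict.empty = c :=
        PySem.Dict.getD_of_get?_eq_some _ _ hget
      have harg : o.modify name PySem.Dict.empty (fun c => c.insert ap.1 (c.getD ap.1 0 + ap.2))
          = o.insert name (c.insert ap.1 (c.getD ap.1 0 + ap.2)) := by
        unfold PySem.Dict.modify
        rw [hgetD]
      rw [List.foldl_cons, harg,
        ih _ _ (PySem.Dict.nodup_keys_insert _ _ _ hnd) (PySem.Dict.get?_insert_self _ _ _),
        PySem.Dict.insert_insert_self]
      rfl

-- A's per-bucket pass = pvAccum at the bucket's key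
theorem pvBucketFold_eq (hd : PySem.Dict Int (List (String × Int))) (name : String) :
    ∀ (hs : List Int) (o : PySem.Dict String (PySem.Dict String Int))
      (c : PySem.Dict String Int), o.keys.Nodup → o.get? name = some c →
    pvBucketFold hd name hs o = o.insert name (pvAccum hd hs c) := by
  intro hs
  induction hs with
  | nil =>
      intro o c hnd hget
      rw [pvAccum_nil]
      simpa [pvBucketFold] using (pvInsert_self o name c hnd hget).symm
  | cons h t ih =>
      intro o c hnd hget
      rw [pvAccum_cons]
      cases hh : hd.get? h with
      | none =>
          have hstep : pvBucketFold hd name (h :: t) o = pvBucketFold hd name t o := by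
            unfold pvBucketFold
            simp only [List.foldl_cons]
            rw [hh]
          have hps : pvStep hd c h = c := by unfold pvStep; rw [hh]
          rw [hstep, ih _ _ hnd hget, hps]
      | some ctr =>
          have hstep : pvBucketFold hd name (h :: t) o
              = pvBucketFold hd name t
                  (ctr.foldl (fun o ap =>
                    o.modify name PySem.Dict.empty
                      (fun c => c.insert ap.1 (c.getD ap.1 0 + ap.2))) o) := by
            unfold pvBucketFold
            simp only [List.foldl_cons]
            rw [hh]
          have hps : pvStep hd c h = ctr.foldl pvGAdd c := by unfold pvStep; rw [hh]
          rw [hstep, pvInnerA name ctr o c hnd hget,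
            ih _ _ (PySem.Dict.nodup_keys_insert _ _ _ hnd) (PySem.Dict.get?_insert_self _ _ _),
            PySem.Dict.insert_insert_self, hps]

-- bucket-membership predicate used to carve the key list into the four buckets
def pvInBkt (lo hi : Int) (h : Int) : Bool := decide (lo ≤ h ∧ h < hi)

-- absent hours are no-ops: the accumulation only sees present keys
theorem pvAccum_filter_present (hd : PySem.Dict Int (List (String × Int))) :
    ∀ (hs : List Int) (c : PySem.Dict String Int),
    pvAccum hd hs c = pvAccum hd (hs.filter (fun h => (hd.get? h).isSome)) c := by
  intro hs
  induction hs with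
  | nil => intro c; rfl
  | cons h t ih =>
      intro c
      cases hh : hd.get? h with
      | none =>
          rw [pvAccum_cons]
          have hps : pvStep hd c h = c := by unfold pvStep; rw [hh]
          rw [hps]
          simp only [List.filter_cons, hh, Option.isSome_none, if_neg Bool.false_ne_true]
          exact ih c
      | some items =>
          rw [pvAccum_cons]
          simp only [List.filter_cons, hh, Option.isSome_some, if_pos]
          rw [pvAccum_cons, ih]

-- two strictly increasing integer lists with the same members are equal
theorem pvSortedExt : ∀ (l1 l2 : List Int), l1.Pairwise (· < ·) → l2.Pairwise (· < ·) →
    (∀ x, x ∈ l1 ↔ x ∈ l2) → l1 = l2 := by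
  intro l1
  induction l1 with
  | nil =>
      intro l2 _ _ hm
      cases l2 with
      | nil => rfl
      | cons b t2 => exact absurd ((hm b).mpr List.mem_cons_self) List.not_mem_nil
  | cons a t1 ih =>
      intro l2 h1 h2 hm
      cases l2 with
      | nil => exact absurd ((hm a).mp List.mem_cons_self) List.not_mem_nil
      | cons b t2 =>
          have hab : a = b := by
            rcases List.mem_cons.mp ((hm a).mp List.mem_cons_self) with h | ha
            · exact h
            · rcases List.mem_cons.mp ((hm b).mpr List.mem_cons_self) with h | hb
              · exact h.symm
              · have h1' := (List.pairwise_cons.mp h1).1 _ hb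
                have h2' := (List.pairwise_cons.mp h2).1 _ ha
                omega
          subst hab
          have htail : ∀ x, x ∈ t1 ↔ x ∈ t2 := by
            intro x
            constructor
            · intro hx
              have hax := (List.pairwise_cons.mp h1).1 _ hx
              rcases List.mem_cons.mp ((hm x).mp (List.mem_cons_of_mem _ hx)) with h | h
              · omega
              · exact h
            · intro hx
              have hax := (List.pairwise_cons.mp h2).1 _ hx
              rcases List.mem_cons.mp ((hm x).mpr (List.mem_cons_of_mem _ hx)) with h | h
              · omega
              · exact h
          rw [ih t2 (List.pairwise_cons.mp h1).2 (List.pairwise_cons.mp h2).2 htail]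

-- A's probe over a full hour range visits exactly the sorted present keys of that range
theorem pvSeg (hourly : List (Int × List (String × Int))) (lo hi : Int) :
    pvAccum (PySem.Dict.mk hourly) (PySem.List.pyRange lo hi 1) PySem.Dict.empty
      = pvAccum (PySem.Dict.mk hourly)
          ((PySem.List.sorted (PySem.Set.ofList (List.map (fun p => p.1) hourly))
              (fun h => h)).filter (pvInBkt lo hi)) PySem.Dict.empty := by
  conv_lhs => rw [pvAccum_filter_present]
  conv_rhs => rw [pvAccum_filter_present]
  congr 1
  have hmem : ∀ x : Int, ((PySem.Dict.mk hourly).get? x).isSome = true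
      ↔ x ∈ List.map (fun p : Int × List (String × Int) => p.1) hourly := by
    intro x
    constructor
    · intro hs
      by_contra hx
      have hnone : (PySem.Dict.mk hourly).get? x = none :=
        (PySem.Dict.get?_eq_none_iff_not_mem_keys _ _).mpr
          (by rw [PySem.Dict.keys_mk]; exact hx)
      rw [hnone] at hs
      simp at hs
    · intro hx
      by_contra hs
      have hnone : (PySem.Dict.mk hourly).get? x = none := by
        cases hcase : (PySem.Dict.mk hourly).get? x with
        | none => rfl
        | some v => rw [hcase] at hs; simp at hs
      have := (PySem.Dict.get?_eq_none_iff_not_mem_keys _ _).mp hnone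
      rw [PySem.Dict.keys_mk] at this
      exact this hx
  apply pvSortedExt
  · exact (PySem.List.pairwise_lt_pyRange_one lo hi).filter _
  · exact ((PySem.List.sorted_ofList_pairwise_lt _).filter _).filter _
  · intro x
    simp only [List.mem_filter, PySem.List.mem_pyRange_one, PySem.List.mem_sorted,
      PySem.Set.mem_ofList, pvInBkt, decide_eq_true_eq]
    rw [hmem x]
    tauto

-- A evaluated: the four buckets, each accumulated over its full hour range
theorem pvA_eq (hourly : List (Int × List (String × Int))) :
    build_time_buckets_py hourly
      = [("night(00-05)", pvMostCommon3
            (pvAccum (PySem.Dict.mk hourly) (PySem.List.pyRange 0 6 1) PySem.Dict.empty).items),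
         ("morning(06-11)", pvMostCommon3
            (pvAccum (PySem.Dict.mk hourly) (PySem.List.pyRange 6 12 1) PySem.Dict.empty).items),
         ("afternoon(12-17)", pvMostCommon3
            (pvAccum (PySem.Dict.mk hourly) (PySem.List.pyRange 12 18 1) PySem.Dict.empty).items),
         ("evening(18-23)", pvMostCommon3
            (pvAccum (PySem.Dict.mk hourly) (PySem.List.pyRange 18 24 1) PySem.Dict.empty).items)]
      := by
  have h0 : build_time_buckets_py hourly
      = (pvBucketFold (PySem.Dict.mk hourly) "evening(18-23)" (PySem.List.pyRange 18 24 1)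
          (pvBucketFold (PySem.Dict.mk hourly) "afternoon(12-17)" (PySem.List.pyRange 12 18 1)
            (pvBucketFold (PySem.Dict.mk hourly) "morning(06-11)" (PySem.List.pyRange 6 12 1)
              (pvBucketFold (PySem.Dict.mk hourly) "night(00-05)" (PySem.List.pyRange 0 6 1)
                (PySem.Dict.mk
                  [("night(00-05)", PySem.Dict.empty), ("morning(06-11)", PySem.Dict.empty),
                   ("afternoon(12-17)", PySem.Dict.empty),
                   ("evening(18-23)", PySem.Dict.empty)]))))).items.map
          (fun p => (p.1, pvMostCommon3 p.2.items)) := rfl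
  rw [h0]
  set hd := PySem.Dict.mk hourly with hhd
  set A0 := pvAccum hd (PySem.List.pyRange 0 6 1) PySem.Dict.empty with hA0
  set A1 := pvAccum hd (PySem.List.pyRange 6 12 1) PySem.Dict.empty with hA1
  set A2 := pvAccum hd (PySem.List.pyRange 12 18 1) PySem.Dict.empty with hA2
  set A3 := pvAccum hd (PySem.List.pyRange 18 24 1) PySem.Dict.empty with hA3
  set o0 := PySem.Dict.mk
      [("night(00-05)", (PySem.Dict.empty : PySem.Dict String Int)),
       ("morning(06-11)", PySem.Dict.empty), ("afternoon(12-17)", PySem.Dict.empty),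
       ("evening(18-23)", PySem.Dict.empty)] with ho0
  have nd0 : o0.keys.Nodup := by rw [ho0, PySem.Dict.keys_mk]; decide
  have g0 : o0.get? "night(00-05)" = some PySem.Dict.empty := by rw [ho0]; decide
  rw [pvBucketFold_eq hd "night(00-05)" (PySem.List.pyRange 0 6 1) o0
      PySem.Dict.empty nd0 g0, ← hA0]
  have nd1 : (o0.insert "night(00-05)" A0).keys.Nodup :=
    PySem.Dict.nodup_keys_insert _ _ _ nd0
  have g1 : (o0.insert "night(00-05)" A0).get? "morning(06-11)" = some PySem.Dict.empty := by
    rw [PySem.Dict.get?_insert_of_ne _ _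
      (show ("morning(06-11)" : String) ≠ "night(00-05)" by decide), ho0]
    decide
  rw [pvBucketFold_eq hd "morning(06-11)" (PySem.List.pyRange 6 12 1) _
      PySem.Dict.empty nd1 g1, ← hA1]
  have nd2 : ((o0.insert "night(00-05)" A0).insert "morning(06-11)" A1).keys.Nodup :=
    PySem.Dict.nodup_keys_insert _ _ _ nd1
  have g2 : ((o0.insert "night(00-05)" A0).insert "morning(06-11)" A1).get? "afternoon(12-17)"
      = some PySem.Dict.empty := by
    rw [PySem.Dict.get?_insert_of_ne _ _
        (show ("afternoon(12-17)" : String) ≠ "morning(06-11)" by decide),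
      PySem.Dict.get?_insert_of_ne _ _
        (show ("afternoon(12-17)" : String) ≠ "night(00-05)" by decide), ho0]
    decide
  rw [pvBucketFold_eq hd "afternoon(12-17)" (PySem.List.pyRange 12 18 1) _
      PySem.Dict.empty nd2 g2, ← hA2]
  have nd3 : (((o0.insert "night(00-05)" A0).insert "morning(06-11)" A1).insert
      "afternoon(12-17)" A2).keys.Nodup := PySem.Dict.nodup_keys_insert _ _ _ nd2
  have g3 : (((o0.insert "night(00-05)" A0).insert "morning(06-11)" A1).insert
      "afternoon(12-17)" A2).get? "evening(18-23)" = some PySem.Dict.empty := by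
    rw [PySem.Dict.get?_insert_of_ne _ _
        (show ("evening(18-23)" : String) ≠ "afternoon(12-17)" by decide),
      PySem.Dict.get?_insert_of_ne _ _
        (show ("evening(18-23)" : String) ≠ "morning(06-11)" by decide),
      PySem.Dict.get?_insert_of_ne _ _
        (show ("evening(18-23)" : String) ≠ "night(00-05)" by decide), ho0]
    decide
  rw [pvBucketFold_eq hd "evening(18-23)" (PySem.List.pyRange 18 24 1) _
      PySem.Dict.empty nd3 g3, ← hA3]
  rw [ho0]
  rfl

-- ---- the B side: flat dict and streaming top-3, characterised ----

-- the flat triple stream B's first loop effectively consumes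
def pvT (hd : PySem.Dict Int (List (String × Int))) (ks : List Int) :
    List ((Int × String) × Int) :=
  (ks.filter (fun h => decide (0 ≤ h ∧ h < 24))).flatMap
    (fun h => ((hd.get? h).getD []).map (fun ap => ((PySem.Int.floordiv h 6, ap.1), ap.2)))

-- B's first loop is the pvGAdd fold of that stream
theorem pvCollect_eq_gsum (hd : PySem.Dict Int (List (String × Int))) :
    ∀ (ks : List Int) (F : PySem.Dict (Int × String) Int),
    ks.foldl (pvCollect hd) F = (pvT hd ks).foldl pvGAdd F := by
  intro ks
  induction ks with
  | nil => intro F; rfl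
  | cons h t ih =>
      intro F
      by_cases h24 : 0 ≤ h ∧ h < 24
      · have hf : (decide (0 ≤ h ∧ h < 24)) = true := by simpa using h24
        cases hh : hd.get? h with
        | none =>
            have harg : pvCollect hd F h = F := by unfold pvCollect; rw [if_pos h24, hh]
            rw [List.foldl_cons, harg, ih]
            unfold pvT
            rw [List.filter_cons_of_pos (p := fun x : Int => decide (0 ≤ x ∧ x < 24)) hf, List.flatMap_cons, hh]
            rfl
        | some items =>
            have harg : pvCollect hd F h
                = (items.map (fun ap => ((PySem.Int.floordiv h 6, ap.1), ap.2))).foldl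
                    pvGAdd F := by
              unfold pvCollect
              rw [if_pos h24, hh, List.foldl_map]
              rfl
            rw [List.foldl_cons, harg, ih]
            unfold pvT
            rw [List.filter_cons_of_pos (p := fun x : Int => decide (0 ≤ x ∧ x < 24)) hf, List.flatMap_cons, hh, List.foldl_append]
            rfl
      · have hf : ¬ (decide (0 ≤ h ∧ h < 24)) = true := by simpa using h24
        have harg : pvCollect hd F h = F := by unfold pvCollect; rw [if_neg h24]
        rw [List.foldl_cons, harg, ih]
        unfold pvT
        rw [List.filter_cons_of_neg (p := fun x : Int => decide (0 ≤ x ∧ x < 24)) hf]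

-- bucket indices carried by the stream are 0..3
theorem pvT_keys (hd : PySem.Dict Int (List (String × Int))) (ks : List Int) :
    ∀ p ∈ pvT hd ks, 0 ≤ p.1.1 ∧ p.1.1 < 4 := by
  intro p hp
  simp only [pvT, List.mem_flatMap, List.mem_filter, List.mem_map, decide_eq_true_eq] at hp
  obtain ⟨h, ⟨_, h24⟩, ap, _, hape⟩ := hp
  have h1 : p.1.1 = PySem.Int.floordiv h 6 := by rw [← hape]
  rw [h1, PySem.Int.floordiv_eq_ediv_of_pos (by norm_num)]
  omega

-- the stream, restricted to one bucket: exactly that bucket's hours, relabelled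
theorem pvT_filter (hd : PySem.Dict Int (List (String × Int))) (b lo hi : Int)
    (hlo : lo = 6 * b) (hhi : hi = 6 * b + 6) (hb : 0 ≤ b ∧ b < 4)
    (q : String × Int → Bool) :
    ∀ ks : List Int,
    (pvT hd ks).filter (fun p => p.1.1 == b && q (p.1.2, p.2))
      = ((ks.filter (pvInBkt lo hi)).flatMap (fun h => ((hd.get? h).getD []).filter q)).map
          (fun ap => ((b, ap.1), ap.2)) := by
  intro ks
  induction ks with
  | nil => simp [pvT]
  | cons h t ih =>
      by_cases h24 : 0 ≤ h ∧ h < 24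
      · have hf : (decide (0 ≤ h ∧ h < 24)) = true := by simpa using h24
        have hTcons : pvT hd (h :: t)
            = (((hd.get? h).getD []).map
                (fun ap => ((PySem.Int.floordiv h 6, ap.1), ap.2))) ++ pvT hd t := by
          unfold pvT
          rw [List.filter_cons_of_pos (p := fun x : Int => decide (0 ≤ x ∧ x < 24)) hf, List.flatMap_cons]
        rw [hTcons, List.filter_append]
        by_cases hfd : PySem.Int.floordiv h 6 = b
        · have hrange : lo ≤ h ∧ h < hi := by
            have := (PySem.Int.floordiv_eq_iff_of_pos (by norm_num : (0:Int) < 6)).mp hfd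
            omega
          have hbkt : pvInBkt lo hi h = true := by
            simp only [pvInBkt, decide_eq_true_eq]; exact hrange
          have hpart : (((hd.get? h).getD []).map
                (fun ap => ((PySem.Int.floordiv h 6, ap.1), ap.2))).filter
                  (fun p => p.1.1 == b && q (p.1.2, p.2))
              = (((hd.get? h).getD []).filter q).map (fun ap => ((b, ap.1), ap.2)) := by
            rw [List.filter_map, hfd]
            have hpred : ∀ ap ∈ (hd.get? h).getD [],
                ((fun p => p.1.1 == b && q (p.1.2, p.2)) ∘
                  (fun ap : String × Int => (((b : Int), ap.1), ap.2))) ap = q ap := by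
              intro ap _
              simp
            rw [List.filter_congr hpred]
          rw [hpart, ih, List.filter_cons_of_pos hbkt, List.flatMap_cons, List.map_append]
        · have hbkt : ¬ pvInBkt lo hi h = true := by
            simp only [pvInBkt, decide_eq_true_eq]
            intro hr
            apply hfd
            rw [PySem.Int.floordiv_eq_iff_of_pos (by norm_num : (0:Int) < 6)]
            omega
          have hfdeq : (PySem.Int.floordiv h 6 == b) = false := by
            simpa using hfd
          have hpart : (((hd.get? h).getD []).map
                (fun ap => ((PySem.Int.floordiv h 6, ap.1), ap.2))).filter
                  (fun p => p.1.1 == b && q (p.1.2, p.2)) = [] := by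
            rw [List.filter_map]
            have hnil : List.filter ((fun p => p.1.1 == b && q (p.1.2, p.2)) ∘
                  (fun ap : String × Int => ((PySem.Int.floordiv h 6, ap.1), ap.2)))
                ((hd.get? h).getD []) = [] := by
              apply List.filter_eq_nil_iff.mpr
              intro ap _
              simp only [Function.comp_apply, hfdeq, Bool.false_and]
              simp
            rw [hnil, List.map_nil]
          rw [hpart, ih, List.filter_cons_of_neg hbkt, List.nil_append]
      · have hf : ¬ (decide (0 ≤ h ∧ h < 24)) = true := by simpa using h24
        have hbkt : ¬ pvInBkt lo hi h = true := by
          simp only [pvInBkt, decide_eq_true_eq]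
          omega
        have hTcons : pvT hd (h :: t) = pvT hd t := by
          unfold pvT
          rw [List.filter_cons_of_neg (p := fun x : Int => decide (0 ≤ x ∧ x < 24)) hf]
        rw [hTcons, ih, List.filter_cons_of_neg hbkt]

-- A's per-bucket counter as a pvGAdd fold of its flat app stream
theorem pvAccum_eq_gsum (hd : PySem.Dict Int (List (String × Int))) :
    ∀ (ks : List Int) (c : PySem.Dict String Int),
    pvAccum hd ks c = (ks.flatMap (fun h => (hd.get? h).getD [])).foldl pvGAdd c := by
  intro ks
  induction ks with
  | nil => intro c; rfl
  | cons h t ih =>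
      intro c
      rw [pvAccum_cons, ih, List.flatMap_cons, List.foldl_append]
      cases hh : hd.get? h with
      | none =>
          have : pvStep hd c h = c := by unfold pvStep; rw [hh]
          rw [this]
          simp
      | some items =>
          have : pvStep hd c h = items.foldl pvGAdd c := by unfold pvStep; rw [hh]
          rw [this]
          simp

-- one bucket of the flat dict, bucket tag stripped, IS that bucket's counter
theorem pvBucketItems (hd : PySem.Dict Int (List (String × Int))) (ks : List Int)
    (b lo hi : Int) (hlo : lo = 6 * b) (hhi : hi = 6 * b + 6) (hb : 0 ≤ b ∧ b < 4) :
    ((((pvT hd ks).foldl pvGAdd PySem.Dict.empty).items.filter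
        (fun p => p.1.1 == b)).map (fun p => (p.1.2, p.2)))
      = (pvAccum hd (ks.filter (pvInBkt lo hi)) PySem.Dict.empty).items := by
  set T := pvT hd ks with hT
  set Fl := (ks.filter (pvInBkt lo hi)).flatMap (fun h => (hd.get? h).getD []) with hFl
  -- the bucket's slice of the stream, as the bucket's flat app stream relabelled
  have hTb : T.filter (fun p => p.1.1 == b) = Fl.map (fun ap => ((b, ap.1), ap.2)) := by
    have hc : ∀ p ∈ T, (fun p : (Int × String) × Int => p.1.1 == b) p
        = (fun p : (Int × String) × Int =>
            p.1.1 == b && (fun _ : String × Int => true) (p.1.2, p.2)) p := by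
      intro p _
      simp
    rw [List.filter_congr hc, hT, pvT_filter hd b lo hi hlo hhi hb (fun _ => true) ks]
    have hft : (fun h => ((hd.get? h).getD []).filter (fun _ : String × Int => true))
        = (fun h => ((hd.get? h).getD [] : List (String × Int))) :=
      funext (fun h => List.filter_true _)
    rw [hft, hFl]
  -- per-key totals agree once the bucket tag is fixed
  have hsum : ∀ a : String, pvKeySum T (b, a) = pvKeySum Fl a := by
    intro a
    have hc : ∀ p ∈ T, (fun p : (Int × String) × Int => p.1 == (b, a)) p
        = (fun p : (Int × String) × Int =>
            p.1.1 == b && (fun ap : String × Int => ap.1 == a) (p.1.2, p.2)) p := by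
      intro p _
      obtain ⟨⟨pb, ps⟩, pv⟩ := p
      rfl
    unfold pvKeySum
    rw [List.filter_congr hc, hT, pvT_filter hd b lo hi hlo hhi hb (fun ap => ap.1 == a) ks,
      ← List.filter_flatMap, ← hFl, List.map_map]
    rfl
  -- the bucket's first-seen keys are the bucket's first-seen apps, tagged
  have hinj : ∀ (x y : String), (fun a : String => ((b : Int), a)) x
      = (fun a : String => ((b : Int), a)) y → x = y := by
    intro x y hxy
    exact congrArg Prod.snd hxy
  have hkeys : PySem.Set.ofList ((T.filter (fun p => p.1.1 == b)).map (fun p => p.1))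
      = (PySem.Set.ofList (Fl.map (fun p => p.1))).map (fun a : String => ((b : Int), a)) := by
    rw [hTb, ← pvOfList_map_inj (fun a : String => ((b : Int), a)) hinj]
    congr 1
    rw [List.map_map, List.map_map]
    exact List.map_congr_left (fun ap _ => rfl)
  have hc2 : (T.map (fun p => p.1)).filter (fun k : Int × String => k.1 == b)
      = (T.filter (fun p => p.1.1 == b)).map (fun p => p.1) := by
    rw [List.filter_map]
    congr 1
  rw [pvGsum_items T, List.filter_map]
  have hc0 : List.filter ((fun p : (Int × String) × Int => p.1.1 == b) ∘
        (fun k : Int × String => (k, pvKeySum T k)))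
        (PySem.Set.ofList (T.map (fun p => p.1)))
      = List.filter (fun k : Int × String => k.1 == b)
        (PySem.Set.ofList (T.map (fun p => p.1))) :=
    List.filter_congr (fun k _ => rfl)
  rw [hc0, ← pvOfList_filter, hc2, hkeys, List.map_map, List.map_map, pvAccum_eq_gsum,
    pvGsum_items, ← hFl]
  apply List.map_congr_left
  intro a _
  show ((a : String), pvKeySum T (b, a)) = (a, pvKeySum Fl a)
  rw [hsum a]

-- ---- streaming bounded insertion = most_common(3) ----

theorem pvIns_eq_insertBy (x : String × Int) :
    ∀ s : List (String × Int),
    pvIns x s = PySem.List.insertBy (fun a b => decide (b.2 < a.2)) x s := by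
  intro s
  induction s with
  | nil => rfl
  | cons y t ih =>
      by_cases hxy : x.2 ≤ y.2
      · have hb : (decide (y.2 < x.2)) = false := by simp; omega
        simp [pvIns, hxy, PySem.List.insertBy, hb, ih]
      · have hb : (decide (y.2 < x.2)) = true := by simp; omega
        simp [pvIns, hxy, PySem.List.insertBy, hb]

theorem pvInsertBy_take (bef : (String × Int) → (String × Int) → Bool) (x : String × Int) :
    ∀ (s : List (String × Int)) (n : Nat),
    (PySem.List.insertBy bef x (s.take n)).take n
      = (PySem.List.insertBy bef x s).take n := by
  intro s
  induction s with
  | nil => intro n; rw [List.take_nil]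
  | cons y t ih =>
      intro n
      cases n with
      | zero => simp
      | succ m =>
          by_cases hb : bef x y = true
          · have e1 : PySem.List.insertBy bef x ((y :: t).take (m + 1))
                = x :: y :: t.take m := by
              rw [List.take_succ_cons]
              simp [PySem.List.insertBy, hb]
            have e2 : PySem.List.insertBy bef x (y :: t) = x :: y :: t := by
              simp [PySem.List.insertBy, hb]
            rw [e1, e2, List.take_succ_cons, List.take_succ_cons]
            cases m with
            | zero => rfl
            | succ j =>
                rw [List.take_succ_cons, List.take_succ_cons, List.take_take]
                have hmin : min j (j + 1) = j := by omega
                rw [hmin]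
          · have e1 : PySem.List.insertBy bef x ((y :: t).take (m + 1))
                = y :: PySem.List.insertBy bef x (t.take m) := by
              rw [List.take_succ_cons]
              simp [PySem.List.insertBy, hb]
            have e2 : PySem.List.insertBy bef x (y :: t)
                = y :: PySem.List.insertBy bef x t := by
              simp [PySem.List.insertBy, hb]
            rw [e1, e2, List.take_succ_cons, List.take_succ_cons, ih m]

-- the streaming fold, from a truncated start, is the truncated insertion sort
theorem pvSfold_eq :
    ∀ (l : List (String × Int)) (s : List (String × Int)),
    l.foldl (fun acc x => (pvIns x acc).take 3) (s.take 3)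
      = (l.foldl (fun acc x =>
          PySem.List.insertBy (fun a b => decide (b.2 < a.2)) x acc) s).take 3 := by
  intro l
  induction l with
  | nil => intro s; rfl
  | cons x t ih =>
      intro s
      rw [List.foldl_cons, List.foldl_cons, pvIns_eq_insertBy, pvInsertBy_take, ih]

theorem pvSfold_mostCommon3 (l : List (String × Int)) :
    l.foldl (fun acc x => (pvIns x acc).take 3) [] = pvMostCommon3 l := by
  have h := pvSfold_eq l []
  simp only [List.take_nil] at h
  rw [h, pvMostCommon3, PySem.List.sorted_rev_eq_foldl_insertBy]

-- B's dispatch loop splits into the four buckets' independent streaming folds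
theorem pvDispatch_fold :
    ∀ (ps : List ((Int × String) × Int)) (t0 t1 t2 t3 : List (String × Int)),
    (∀ p ∈ ps, 0 ≤ p.1.1 ∧ p.1.1 < 4) →
    ps.foldl pvDispatch [t0, t1, t2, t3]
      = [((ps.filter (fun p => p.1.1 == (0:Int))).map (fun p => (p.1.2, p.2))).foldl
            (fun acc x => (pvIns x acc).take 3) t0,
         ((ps.filter (fun p => p.1.1 == (1:Int))).map (fun p => (p.1.2, p.2))).foldl
            (fun acc x => (pvIns x acc).take 3) t1,
         ((ps.filter (fun p => p.1.1 == (2:Int))).map (fun p => (p.1.2, p.2))).foldl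
            (fun acc x => (pvIns x acc).take 3) t2,
         ((ps.filter (fun p => p.1.1 == (3:Int))).map (fun p => (p.1.2, p.2))).foldl
            (fun acc x => (pvIns x acc).take 3) t3] := by
  intro ps
  induction ps with
  | nil => intro t0 t1 t2 t3 _; rfl
  | cons p ps ih =>
      intro t0 t1 t2 t3 hmem
      have hp := hmem p List.mem_cons_self
      have hrest : ∀ x ∈ ps, 0 ≤ x.1.1 ∧ x.1.1 < 4 :=
        fun x hx => hmem x (List.mem_cons_of_mem _ hx)
      have hcases : p.1.1 = 0 ∨ p.1.1 = 1 ∨ p.1.1 = 2 ∨ p.1.1 = 3 := by omega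
      rcases hcases with h0 | h1 | h2 | h3
      · have hstep : pvDispatch [t0, t1, t2, t3] p
            = [(pvIns (p.1.2, p.2) t0).take 3, t1, t2, t3] := by
          unfold pvDispatch
          rw [h0]
          rfl
        rw [List.foldl_cons, hstep, ih _ _ _ _ hrest,
          List.filter_cons_of_pos (by simp [h0]),
          List.filter_cons_of_neg (by simp [h0]),
          List.filter_cons_of_neg (by simp [h0]),
          List.filter_cons_of_neg (by simp [h0]),
          List.map_cons, List.foldl_cons]
      · have hstep : pvDispatch [t0, t1, t2, t3] p
            = [t0, (pvIns (p.1.2, p.2) t1).take 3, t2, t3] := by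
          unfold pvDispatch
          rw [h1]
          rfl
        rw [List.foldl_cons, hstep, ih _ _ _ _ hrest,
          List.filter_cons_of_neg (by simp [h1]),
          List.filter_cons_of_pos (by simp [h1]),
          List.filter_cons_of_neg (by simp [h1]),
          List.filter_cons_of_neg (by simp [h1]),
          List.map_cons, List.foldl_cons]
      · have hstep : pvDispatch [t0, t1, t2, t3] p
            = [t0, t1, (pvIns (p.1.2, p.2) t2).take 3, t3] := by
          unfold pvDispatch
          rw [h2]
          rfl
        rw [List.foldl_cons, hstep, ih _ _ _ _ hrest,
          List.filter_cons_of_neg (by simp [h2]),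
          List.filter_cons_of_neg (by simp [h2]),
          List.filter_cons_of_pos (by simp [h2]),
          List.filter_cons_of_neg (by simp [h2]),
          List.map_cons, List.foldl_cons]
      · have hstep : pvDispatch [t0, t1, t2, t3] p
            = [t0, t1, t2, (pvIns (p.1.2, p.2) t3).take 3] := by
          unfold pvDispatch
          rw [h3]
          rfl
        rw [List.foldl_cons, hstep, ih _ _ _ _ hrest,
          List.filter_cons_of_neg (by simp [h3]),
          List.filter_cons_of_neg (by simp [h3]),
          List.filter_cons_of_neg (by simp [h3]),
          List.filter_cons_of_pos (by simp [h3]),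
          List.map_cons, List.foldl_cons]

-- B evaluated: the four buckets, each the counter's streaming top three
theorem pvB_eq (hourly : List (Int × List (String × Int))) :
    build_time_buckets_py_alt hourly
      = [("night(00-05)", pvMostCommon3
            (pvAccum (PySem.Dict.mk hourly)
              ((PySem.List.sorted (PySem.Set.ofList (List.map (fun p => p.1) hourly))
                  (fun h => h)).filter (pvInBkt 0 6)) PySem.Dict.empty).items),
         ("morning(06-11)", pvMostCommon3
            (pvAccum (PySem.Dict.mk hourly)
              ((PySem.List.sorted (PySem.Set.ofList (List.map (fun p => p.1) hourly))
                  (fun h => h)).filter (pvInBkt 6 12)) PySem.Dict.empty).items),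
         ("afternoon(12-17)", pvMostCommon3
            (pvAccum (PySem.Dict.mk hourly)
              ((PySem.List.sorted (PySem.Set.ofList (List.map (fun p => p.1) hourly))
                  (fun h => h)).filter (pvInBkt 12 18)) PySem.Dict.empty).items),
         ("evening(18-23)", pvMostCommon3
            (pvAccum (PySem.Dict.mk hourly)
              ((PySem.List.sorted (PySem.Set.ofList (List.map (fun p => p.1) hourly))
                  (fun h => h)).filter (pvInBkt 18 24)) PySem.Dict.empty).items)] := by
  have h0 : build_time_buckets_py_alt hourly
      = (["night(00-05)", "morning(06-11)", "afternoon(12-17)", "evening(18-23)"] :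
          List String).zip
          (List.foldl pvDispatch [[], [], [], []]
            (((PySem.List.sorted (PySem.Set.ofList (hourly.map (fun p => p.1)))
                (fun h => h)).foldl (pvCollect (PySem.Dict.mk hourly))
              PySem.Dict.empty).items)) := rfl
  rw [h0, pvCollect_eq_gsum]
  set hd := PySem.Dict.mk hourly with hhd
  set ks := PySem.List.sorted (PySem.Set.ofList (List.map (fun p => p.1) hourly))
      (fun h => h) with hks
  have hkeys : ∀ p ∈ ((pvT hd ks).foldl pvGAdd PySem.Dict.empty).items,
      0 ≤ p.1.1 ∧ p.1.1 < 4 := by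
    intro p hp
    rw [pvGsum_items] at hp
    obtain ⟨k, hk, hke⟩ := List.mem_map.mp hp
    obtain ⟨q, hq, hqe⟩ :=
      List.mem_map.mp ((PySem.Set.mem_ofList _ _).mp hk)
    have hr := pvT_keys hd ks q hq
    have : p.1 = q.1 := by rw [← hke, ← hqe]
    rw [this]
    exact hr
  rw [pvDispatch_fold _ _ _ _ _ hkeys]
  have hbkt : ∀ (b lo hi : Int), lo = 6 * b → hi = 6 * b + 6 → 0 ≤ b ∧ b < 4 →
      ((((((pvT hd ks).foldl pvGAdd PySem.Dict.empty).items).filter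
          (fun p => p.1.1 == b)).map (fun p => (p.1.2, p.2))).foldl
        (fun acc x => (pvIns x acc).take 3) [])
      = pvMostCommon3 (pvAccum hd (ks.filter (pvInBkt lo hi)) PySem.Dict.empty).items := by
    intro b lo hi hlo hhi hb
    rw [pvBucketItems hd ks b lo hi hlo hhi hb, pvSfold_mostCommon3]
  rw [hbkt 0 0 6 (by norm_num) (by norm_num) (by norm_num),
    hbkt 1 6 12 (by norm_num) (by norm_num) (by norm_num),
    hbkt 2 12 18 (by norm_num) (by norm_num) (by norm_num),
    hbkt 3 18 24 (by norm_num) (by norm_num) (by norm_num)]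
  rfl

-- ===== VERDICT (by name: the statement is the Claim_ definition above) =====
theorem build_time_buckets_py_spec : Claim_equal_build_time_buckets_py := by
  intro hourly _
  unfold Spec_build_time_buckets_py
  rw [pvA_eq, pvB_eq, pvSeg hourly 0 6, pvSeg hourly 6 12, pvSeg hourly 12 18,
    pvSeg hourly 18 24]
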